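-- pv_equiv track=rewrite | github.com/CKQu1/extended-criticality-dnn | fewshot-learning/pretrained_macaque_stimuli.py | transform_model_name
-- ===== SOURCE A (Python) =====
-- def transform_model_name(s):
--     result = ""
--     for i, letter in enumerate(s):
--         if i == 0 or letter == "n":
--             result += letter.upper()
--         elif s[i-1] == "_" and letter.isalpha():
--             result += letter.upper()
--         else:
--             result += letter
--     return result
-- ===== SOURCE B (Python) =====
-- def transform_model_name(s):
--     t = "".join("N" if c == "n" else c for c in s)
--     return "_".join(p[:1].upper() + p[1:] for p in t.split("_"))
-- ===== Notes on version B (the rewrite author's own statement) =====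
-- stated objective: idiomatic
-- what changed: Replaces A's enumerate loop with i==0 checks and s[i-1] lookbacks by a pipeline: map the lowercase letter n to uppercase over the string, split on underscore, uppercase each piece's first character, rejoin with underscore.
import Mathlib
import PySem

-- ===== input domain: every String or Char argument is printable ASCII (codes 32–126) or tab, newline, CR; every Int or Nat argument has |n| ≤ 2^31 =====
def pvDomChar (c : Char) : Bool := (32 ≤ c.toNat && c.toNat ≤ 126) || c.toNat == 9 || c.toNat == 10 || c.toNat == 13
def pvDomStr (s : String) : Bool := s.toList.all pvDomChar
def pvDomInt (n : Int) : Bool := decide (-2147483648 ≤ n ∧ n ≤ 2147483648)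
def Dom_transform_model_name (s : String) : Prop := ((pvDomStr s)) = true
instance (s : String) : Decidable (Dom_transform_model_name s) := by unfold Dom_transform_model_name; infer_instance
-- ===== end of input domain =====

-- B replaces A's indexed loop with prev-character lookups by a map of 'n'→'N' followed by
-- split-on-'_' / capitalize-piece / rejoin (objective: idiomatic); return values are equal.

-- ===== PORT A =====
-- the loop body: for (i, letter), one branch chain appending to result
def transform_model_name_step (s : String) (result : List Char) (p : Int × Char) : List Char :=
  if p.1 == 0 || p.2 == 'n' then
    result ++ [PySem.Chars.upperChar p.2]
  else if (PySem.Str.pyGet? s (p.1 - 1) == some '_') && PySem.Chars.isalpha p.2 then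
    result ++ [PySem.Chars.upperChar p.2]
  else
    result ++ [p.2]

def transform_model_name (s : String) : String :=
  String.mk ((PySem.List.enumerate s.toList 0).foldl (transform_model_name_step s) [])

-- ===== PORT B =====
-- t = "".join("N" if c == "n" else c for c in s)
def transform_model_name_nmap (cs : List Char) : List Char :=
  cs.map (fun c => if c == 'n' then 'N' else c)

-- p[:1].upper() + p[1:]
def transform_model_name_cap (p : List Char) : List Char :=
  PySem.Chars.upper (PySem.List.slice p none (some 1)) ++ PySem.List.slice p (some 1) none

def transform_model_name_alt (s : String) : String :=
  String.mk (PySem.Chars.join ['_']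
    ((PySem.Chars.splitOn (transform_model_name_nmap s.toList) ['_']).map transform_model_name_cap))

-- ===== PRECONDITION & SPEC =====
def Spec_transform_model_name (s : String) (out : String) : Prop := out = transform_model_name_alt s
instance (s : String) (out : String) : Decidable (Spec_transform_model_name s out) := by unfold Spec_transform_model_name; infer_instance

-- ===== CLAIM (what is proved, stated in full; the proofs are below) =====
def Claim_equal_transform_model_name : Prop := ∀ (s : String), Dom_transform_model_name s → Spec_transform_model_name s (transform_model_name s)

-- ===== LEMMAS AND PROOFS =====

-- canonical description of A's loop after the first character: prev is the previous character
def pvMa (prev : Char) : List Char → List Char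
  | [] => []
  | c :: cs =>
      (if c == 'n' then PySem.Chars.upperChar c
       else if (prev == '_') && PySem.Chars.isalpha c then PySem.Chars.upperChar c
       else c) :: pvMa c cs

-- canonical description of A's whole loop
def pvCanonA : List Char → List Char
  | [] => []
  | c :: cs => PySem.Chars.upperChar c :: pvMa c cs

-- canonical description of B: u = "previous char was '_' (or start of string)"
def pvMb : Bool → List Char → List Char
  | _, [] => []
  | u, c :: cs => (if u then PySem.Chars.upperChar c else c) :: pvMb (c == '_') cs

-- clean recursive model of splitOn on separator "_"
def pvSp : List Char → List (List Char)
  | [] => [[]]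
  | c :: r => if c = '_' then [] :: pvSp r
              else match pvSp r with
                   | [] => [[c]]
                   | q :: qs => (c :: q) :: qs

theorem pvSp_ne_nil (l : List Char) : pvSp l ≠ [] := by
  cases l with
  | nil => simp [pvSp]
  | cons c r =>
      simp only [pvSp]
      split
      · simp
      · split <;> simp_all

theorem pvModifyHead_id {α : Type} (l : List α) : l.modifyHead (fun x => x) = l := by
  cases l <;> rfl

theorem pvGo_eq (fuel : Nat) (l cur : List Char) (acc : List (List Char))
    (h : l.length < fuel) :
    PySem.Chars.splitOn.go ['_'] fuel l cur acc
      = acc.reverse ++ (pvSp l).modifyHead (cur.reverse ++ ·) := by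
  induction fuel generalizing l cur acc with
  | zero => omega
  | succ f ih =>
      cases l with
      | nil => simp [PySem.Chars.splitOn.go, pvSp]
      | cons c rest =>
          by_cases hc : c = '_'
          · subst hc
            have hpre : List.isPrefixOf ['_'] ('_' :: rest) = true := by
              simp [List.isPrefixOf]
            rw [show PySem.Chars.splitOn.go ['_'] (f+1) ('_' :: rest) cur acc
                  = PySem.Chars.splitOn.go ['_'] f rest [] (cur.reverse :: acc) by
                  simp [PySem.Chars.splitOn.go, hpre]]
            rw [ih rest [] (cur.reverse :: acc) (by simpa using Nat.lt_of_succ_lt_succ h)]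
            simp [pvSp, pvModifyHead_id]
          · have hpre : List.isPrefixOf ['_'] (c :: rest) = false := by
              simp [List.isPrefixOf]
              exact fun h' => hc h'.symm
            rw [show PySem.Chars.splitOn.go ['_'] (f+1) (c :: rest) cur acc
                  = PySem.Chars.splitOn.go ['_'] f rest (c :: cur) acc by
                  simp [PySem.Chars.splitOn.go, hpre]]
            rw [ih rest (c :: cur) acc (by simpa using Nat.lt_of_succ_lt_succ h)]
            obtain ⟨q, qs, hq⟩ : ∃ q qs, pvSp rest = q :: qs := by
              cases hsp : pvSp rest with
              | nil => exact absurd hsp (pvSp_ne_nil rest)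
              | cons q qs => exact ⟨q, qs, rfl⟩
            simp [pvSp, hc, hq]

theorem pvSplitOn_eq (l : List Char) : PySem.Chars.splitOn l ['_'] = pvSp l := by
  rw [PySem.Chars.splitOn, pvGo_eq (l.length + 1) l [] [] (by omega)]
  simp [pvModifyHead_id]

theorem pvCap_nil : transform_model_name_cap [] = [] := by decide

theorem pvCap_cons (c : Char) (r : List Char) :
    transform_model_name_cap (c :: r) = PySem.Chars.upperChar c :: r := by
  simp [transform_model_name_cap, PySem.List.slice, PySem.List.clampIdx, PySem.Chars.upper]

-- B's pipeline computes pvMb, jointly with the "inside a piece" variant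
theorem pvJoin_sp (t : List Char) :
    PySem.Chars.join ['_'] ((pvSp t).map transform_model_name_cap) = pvMb true t ∧
    (∀ p0 ps, pvSp t = p0 :: ps →
      PySem.Chars.join ['_'] (p0 :: ps.map transform_model_name_cap) = pvMb false t) := by
  induction t with
  | nil =>
      constructor
      · simp [pvSp, pvCap_nil, PySem.Chars.join, pvMb, List.intercalate]
      · intro p0 ps h
        simp [pvSp] at h
        simp [h.1, h.2, PySem.Chars.join, pvMb, List.intercalate]
  | cons c r ih =>
      obtain ⟨q, qs, hq⟩ : ∃ q qs, pvSp r = q :: qs := by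
        cases hsp : pvSp r with
        | nil => exact absurd hsp (pvSp_ne_nil r)
        | cons q qs => exact ⟨q, qs, rfl⟩
      by_cases hc : c = '_'
      · subst hc
        have h1 := ih.1
        constructor
        · rw [show pvSp ('_' :: r) = [] :: pvSp r by simp [pvSp]]
          simp only [List.map_cons, pvCap_nil]
          rw [hq] at h1 ⊢
          simp only [List.map_cons] at h1 ⊢
          rw [show PySem.Chars.join ['_'] ([] :: transform_model_name_cap q :: qs.map transform_model_name_cap)
                = '_' :: PySem.Chars.join ['_'] (transform_model_name_cap q :: qs.map transform_model_name_cap) by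
                simp [PySem.Chars.join, List.intercalate]]
          rw [h1]
          simp [pvMb]
          decide
        · intro p0 ps h
          rw [show pvSp ('_' :: r) = [] :: pvSp r by simp [pvSp]] at h
          obtain ⟨rfl, rfl⟩ : p0 = [] ∧ ps = pvSp r := ⟨(List.cons.injEq .. ▸ h).1.symm ▸ rfl, by
            injection h with h1 h2; exact h2.symm⟩
          rw [hq] at h1 ⊢
          simp only [List.map_cons] at h1 ⊢
          rw [show PySem.Chars.join ['_'] ([] :: transform_model_name_cap q :: qs.map transform_model_name_cap)
                = '_' :: PySem.Chars.join ['_'] (transform_model_name_cap q :: qs.map transform_model_name_cap) by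
                simp [PySem.Chars.join, List.intercalate]]
          rw [h1]
          simp [pvMb]
      · have h2 := ih.2 q qs hq
        have hsp : pvSp (c :: r) = (c :: q) :: qs := by simp [pvSp, hc, hq]
        have hjoin : ∀ xs : List (List Char),
            PySem.Chars.join ['_'] ((c :: q) :: xs) = c :: PySem.Chars.join ['_'] (q :: xs) := by
          intro xs; cases xs <;> simp [PySem.Chars.join, List.intercalate]
        have hcap : PySem.Chars.join ['_'] (transform_model_name_cap (c :: q) :: qs.map transform_model_name_cap)
            = PySem.Chars.upperChar c :: PySem.Chars.join ['_'] (q :: qs.map transform_model_name_cap) := by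
          rw [pvCap_cons]
          cases qs <;> simp [PySem.Chars.join, List.intercalate]
        constructor
        · rw [hsp]
          simp only [List.map_cons]
          rw [hcap, h2]
          rw [pvMb, show (c == '_') = false by simp [hc], show (if true then PySem.Chars.upperChar c else c) = PySem.Chars.upperChar c from rfl]
        · intro p0 ps h
          rw [hsp] at h
          injection h with h3 h4
          subst h3; subst h4
          rw [hjoin, h2]
          rw [pvMb, show (c == '_') = false by simp [hc]]
          simp

theorem pvAlt_eq (s : String) :
    transform_model_name_alt s = String.mk (pvMb true (transform_model_name_nmap s.toList)) := by
  rw [transform_model_name_alt, pvSplitOn_eq, (pvJoin_sp (transform_model_name_nmap s.toList)).1]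

-- A's fold from position k ≥ 1 onwards computes pvMa with prev = s[k-1]
theorem pvFoldA (s : String) (k : Nat) (hk : 1 ≤ k) (acc : List Char) :
    (PySem.List.enumerate (s.toList.drop k) k).foldl (transform_model_name_step s) acc
      = acc ++ pvMa (s.toList.getD (k-1) ' ') (s.toList.drop k) := by
  by_cases hlen : s.toList.length ≤ k
  · simp [List.drop_eq_nil_of_le hlen, PySem.List.enumerate_nil, pvMa]
  · push_neg at hlen
    have hdrop : s.toList.drop k = s.toList[k] :: s.toList.drop (k+1) :=
      (List.getElem_cons_drop hlen).symm
    rw [hdrop]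
    rw [PySem.List.enumerate_cons]
    rw [List.foldl_cons]
    have hstep : transform_model_name_step s acc ((k : Int), s.toList[k])
        = acc ++ [(if s.toList[k] == 'n' then PySem.Chars.upperChar s.toList[k]
                   else if (s.toList.getD (k-1) ' ' == '_') && PySem.Chars.isalpha s.toList[k]
                        then PySem.Chars.upperChar s.toList[k] else s.toList[k])] := by
      have hk0 : ((k : Int) == 0) = false := by
        rw [beq_eq_false_iff_ne]
        omega
      have hget : PySem.Str.pyGet? s ((k : Int) - 1) = some (s.toList.getD (k-1) ' ') := by
        have : ((k : Int) - 1) = ((k - 1 : Nat) : Int) := by omega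
        rw [this, PySem.Str.pyGet?_natCast]
        have hlt : k - 1 < s.toList.length := by omega
        simp [List.getElem?_eq_getElem hlt, List.getD, List.getD_eq_getElem?_getD,
          List.getElem?_eq_getElem hlt]
      have hsplit : ∀ (P : Prop) (inst : Decidable P) (u x : Char),
          (if P then acc ++ [u] else acc ++ [x]) = acc ++ [if P then u else x] := by
        intro P inst u x
        split <;> rfl
      simp only [transform_model_name_step, hk0, Bool.false_or, hget]
      by_cases h1 : (s.toList[k] == 'n') = true
      · simp [h1]
      · simp [h1, hsplit]
    rw [hstep]
    have hcast : ((k : Int) + 1) = ((k + 1 : Nat) : Int) := by omega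
    rw [hcast, pvFoldA s (k+1) (by omega)]
    have hgd : s.toList.getD ((k+1)-1) ' ' = s.toList[k] := by
      simp [List.getD_eq_getElem?_getD, List.getElem?_eq_getElem hlen]
    rw [hgd]
    conv_rhs => rw [pvMa]
    simp
termination_by s.toList.length - k
decreasing_by
  simp_wf
  have h : s.toList.length = s.length := by simp
  omega

theorem pvA_eq (s : String) :
    transform_model_name s = String.mk (pvCanonA s.toList) := by
  rw [transform_model_name]
  cases hl : s.toList with
  | nil => simp [PySem.List.enumerate_nil, pvCanonA]
  | cons c cs =>
      rw [PySem.List.enumerate_cons, pvCanonA]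
      rw [List.foldl_cons]
      have hstep0 : transform_model_name_step s [] ((0 : Int), c) = [PySem.Chars.upperChar c] := by
        simp [transform_model_name_step]
      rw [hstep0]
      have hcs : cs = s.toList.drop 1 := by rw [hl]; simp
      have h1 : PySem.List.enumerate cs ((1 : Nat) : Int)
          = PySem.List.enumerate (s.toList.drop 1) ((1 : Nat) : Int) := by rw [← hcs]
      rw [show ((0 : Int) + 1) = ((1 : Nat) : Int) by norm_num, h1,
        pvFoldA s 1 (by omega) [PySem.Chars.upperChar c]]
      have hgd : s.toList.getD 0 ' ' = c := by rw [hl]; rfl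
      rw [hgd, ← hcs]
      simp

-- upperChar only moves lowercase letters
theorem pvUpper_nonalpha (c : Char) (h : PySem.Chars.isalpha c = false) :
    PySem.Chars.upperChar c = c := by
  simp only [PySem.Chars.isalpha, Bool.or_eq_false_iff] at h
  simp [PySem.Chars.upperChar, h.2]

-- pointwise: A's tail map equals B's tail map over the n-replaced string
theorem pvMa_eq_mb (cs : List Char) (prev : Char) :
    pvMa prev cs = pvMb (prev == '_') (transform_model_name_nmap cs) := by
  induction cs generalizing prev with
  | nil => simp [pvMa, transform_model_name_nmap, pvMb]
  | cons c cs ih =>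
      rw [pvMa, show transform_model_name_nmap (c :: cs)
            = (if c == 'n' then 'N' else c) :: transform_model_name_nmap cs by
            simp [transform_model_name_nmap]]
      rw [pvMb]
      have hflag : (((if c == 'n' then 'N' else c) : Char) == '_') = (c == '_') := by
        by_cases hn : c = 'n' <;> simp [hn]
      rw [hflag, ← ih c]
      congr 1
      by_cases hn : c = 'n'
      · subst hn
        have h1 : PySem.Chars.upperChar 'n' = 'N' := by decide
        have h2 : PySem.Chars.upperChar 'N' = 'N' := by decide
        by_cases hp : prev = '_'
        · simp [hp, h1, h2]
        · rw [show ((prev == '_') : Bool) = false by rw [beq_eq_false_iff_ne]; exact hp]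
          simp [h1, h2]
      · simp only [show (c == 'n') = false by simp [hn], if_false, Bool.false_eq_true]
        by_cases hp : prev = '_'
        · simp only [hp, show (('_' == '_') : Bool) = true from rfl, Bool.true_and]
          by_cases ha : PySem.Chars.isalpha c = true
          · simp [ha]
          · simp only [Bool.not_eq_true] at ha
            simp [ha, pvUpper_nonalpha c ha]
        · simp [show (prev == '_') = false by simp [hp]]

-- ===== VERDICT (by name: the statement is the Claim_ definition above) =====
theorem transform_model_name_spec : Claim_equal_transform_model_name := by
  intro s _
  unfold Spec_transform_model_name
  rw [pvA_eq, pvAlt_eq]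
  cases hl : s.toList with
  | nil => simp [pvCanonA, transform_model_name_nmap, pvMb]
  | cons c cs =>
      rw [pvCanonA]
      rw [show transform_model_name_nmap (c :: cs)
            = (if c == 'n' then 'N' else c) :: transform_model_name_nmap cs by
            simp [transform_model_name_nmap]]
      rw [pvMb, pvMa_eq_mb]
      have hhead : PySem.Chars.upperChar c = PySem.Chars.upperChar (if c == 'n' then 'N' else c) := by
        by_cases hn : c = 'n'
        · subst hn
          decide
        · simp [hn]
      have hflag : (((if c == 'n' then 'N' else c) : Char) == '_') = (c == '_') := by
        by_cases hn : c = 'n' <;> simp [hn]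
      rw [hflag]
      simp [hhead]
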